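-- pv_equiv track=rewrite | github.com/nhungnpintern-ai/Python | dict/ex6.py | process_textfile
-- ===== SOURCE A (Python) =====
-- def process_line(line):
--     words = line.strip().split()
--     a=[]
--
--     prev='BEGIN'
--     for word in words:
--         a.append((prev,word))
--         prev = word
--
--     a.append((prev,'END'))
--     return a
--
-- def process_textfile(f):
--     transitions={}
--
--     for line in f:
--         pairs = process_line(line)
--         for current , nxt in pairs:
--             if current not in transitions:
--                 transitions[current]=[]
--             transitions[current].append(nxt)
--     return transitions
-- ===== SOURCE B (Python) =====
-- def process_textfile(f):
--     # Stage 1: flatten the whole text into one list of (word, successor) pairs.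
--     pairs = [p
--              for line in f
--              for seq in (['BEGIN'] + line.strip().split() + ['END'],)
--              for p in zip(seq, seq[1:])]
--     # Stage 2: group — distinct keys in first-appearance order, successors by filtering.
--     keys = list(dict.fromkeys(c for c, _ in pairs))
--     return {k: [n for c, n in pairs if c == k] for k in keys}
-- ===== Notes on version B (the rewrite author's own statement) =====
-- stated objective: alternative
-- what changed: Replaces the incremental dict-building pass (membership test, insert, append per pair) with two staged passes: first flatten the whole text into one list of (word, successor) pairs, then group it by computing the distinct keys in first-appearance order (dict.fromkeys) and, per key, filtering the pair list for its successors; no dict is threaded through the scan.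
import Mathlib
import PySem

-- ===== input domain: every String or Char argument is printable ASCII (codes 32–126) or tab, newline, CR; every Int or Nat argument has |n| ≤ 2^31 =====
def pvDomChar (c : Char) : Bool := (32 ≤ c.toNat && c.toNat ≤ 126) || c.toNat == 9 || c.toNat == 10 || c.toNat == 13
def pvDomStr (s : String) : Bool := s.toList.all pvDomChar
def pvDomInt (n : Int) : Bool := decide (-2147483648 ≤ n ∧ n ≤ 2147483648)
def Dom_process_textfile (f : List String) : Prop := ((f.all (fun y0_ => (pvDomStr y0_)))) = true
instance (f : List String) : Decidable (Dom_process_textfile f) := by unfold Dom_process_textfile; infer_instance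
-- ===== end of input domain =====

-- B replaces the incremental dict-building pass with two staged passes: flatten the text
-- into one list of (word, successor) pairs, then group it (distinct keys in first-appearance
-- order, successors by filtering the pair list); same result, no dict threaded through the scan.

-- ===== PORT A =====
-- helper process_line: prev-accumulator loop over the words
def processLine (line : String) : List (String × String) :=
  let words := PySem.Str.split₀ (PySem.Str.strip line)
  let st := words.foldl (fun (st : List (String × String) × String) word =>
      (st.1 ++ [(st.2, word)], word)) ([], "BEGIN")
  st.1 ++ [(st.2, "END")]

def process_textfile (f : List String) : List (String × List String) :=
  (f.foldl (fun (d : PySem.Dict String (List String)) line =>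
      (processLine line).foldl (fun d p =>
          let d := if d.contains p.1 then d else d.insert p.1 []
          d.modify p.1 [] (fun v => v ++ [p.2])) d)
    PySem.Dict.empty).items

-- ===== PORT B =====
def process_textfile_alt (f : List String) : List (String × List String) :=
  let pairs := f.flatMap (fun line =>
      let seq := "BEGIN" :: (PySem.Str.split₀ (PySem.Str.strip line) ++ ["END"])
      seq.zip seq.tail)
  let keys := PySem.List.dedup (pairs.map (·.1))
  -- the dict comprehension over the Nodup `keys`: its items are exactly this map
  keys.map (fun k => (k, (pairs.filter (fun p => p.1 == k)).map (·.2)))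

-- ===== PRECONDITION & SPEC =====
def Spec_process_textfile (f : List String) (out : List (String × List String)) : Prop := out = process_textfile_alt f
instance (f : List String) (out : List (String × List String)) : Decidable (Spec_process_textfile f out) := by unfold Spec_process_textfile; infer_instance

-- ===== CLAIM (what is proved, stated in full; the proofs are below) =====
def Claim_equal_process_textfile : Prop := ∀ (f : List String), Dom_process_textfile f → Spec_process_textfile f (process_textfile f)

-- ===== LEMMAS AND PROOFS =====

-- A's pair list for a line equals the zip of the sentinel-bracketed sequence with its tail.
theorem pairs_fold_eq (ws : List String) : ∀ (prev : String) (acc : List (String × String)),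
    (let st := ws.foldl (fun (st : List (String × String) × String) word =>
        (st.1 ++ [(st.2, word)], word)) (acc, prev)
     st.1 ++ [(st.2, "END")]) = acc ++ (prev :: (ws ++ ["END"])).zip (ws ++ ["END"]) := by
  induction ws with
  | nil => intro prev acc; simp [List.zip]
  | cons w ws ih =>
    intro prev acc
    simp only [List.foldl_cons]
    rw [ih w (acc ++ [(prev, w)])]
    simp [List.zip]

theorem processLine_eq_zip (line : String) :
    processLine line =
      (let seq := "BEGIN" :: (PySem.Str.split₀ (PySem.Str.strip line) ++ ["END"])
       seq.zip seq.tail) := by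
  simpa [processLine] using pairs_fold_eq (PySem.Str.split₀ (PySem.Str.strip line)) "BEGIN" []

-- A's membership-test-then-insert-then-append step is plain `modify` with default [].
theorem step_eq_modify (d : PySem.Dict String (List String)) (p : String × String) :
    (let d' := if d.contains p.1 then d else d.insert p.1 []
     d'.modify p.1 [] (fun v => v ++ [p.2])) =
    d.modify p.1 [] (fun v => v ++ [p.2]) := by
  by_cases h : d.contains p.1
  · simp [h]
  · have h' : d.contains p.1 = false := by simpa using h
    simp [PySem.Dict.modify, h, PySem.Dict.getD_insert_self,
      PySem.Dict.insert_insert_self, PySem.Dict.getD_of_not_contains]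

-- A's nested fold over lines is one fold over the flattened pair list.
theorem foldl_foldl_eq_flatMap {α β σ : Type} (g : α → List β) (step : σ → β → σ) :
    ∀ (l : List α) (init : σ),
      l.foldl (fun s x => (g x).foldl step s) init = (l.flatMap g).foldl step init := by
  intro l
  induction l with
  | nil => intro init; simp
  | cons x xs ih => intro init; simp [List.foldl_append, ih]

-- ===== VERDICT (by name: the statement is the Claim_ definition above) =====
theorem process_textfile_spec : Claim_equal_process_textfile := by
  intro f _
  unfold Spec_process_textfile process_textfile process_textfile_alt
  -- rewrite A's per-line pairs to the zip form and its step to plain modify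
  have hstep : (fun (d : PySem.Dict String (List String)) (p : String × String) =>
        let d' := if d.contains p.1 then d else d.insert p.1 []
        d'.modify p.1 [] (fun v => v ++ [p.2])) =
      (fun (d : PySem.Dict String (List String)) (p : String × String) =>
        d.modify p.1 [] (fun v => v ++ [p.2])) := by
    funext d p; exact step_eq_modify d p
  simp only [hstep, processLine_eq_zip]
  rw [foldl_foldl_eq_flatMap]
  set ps := f.flatMap (fun line =>
      let seq := "BEGIN" :: (PySem.Str.split₀ (PySem.Str.strip line) ++ ["END"])
      seq.zip seq.tail) with hps
  have hnd : (ps.foldl (fun d p => d.modify p.1 [] (fun v => v ++ [p.2]))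
      PySem.Dict.empty).keys.Nodup := by
    exact PySem.Dict.nodup_keys_foldl_modify_key ps (·.1) [] _ _ (by simp)
  rw [PySem.Dict.items_eq_map_keys _ hnd []]
  have hkeys : (ps.foldl (fun d p => d.modify p.1 [] (fun v => v ++ [p.2]))
      PySem.Dict.empty).keys = PySem.List.dedup (ps.map (·.1)) := by
    rw [PySem.Dict.keys_foldl_modify_key]
    simp [PySem.Set.update_nil_left, PySem.List.dedup_eq_ofList, PySem.Dict.keys_empty]
  rw [hkeys]
  refine List.map_congr_left (fun k _ => ?_)
  rw [PySem.Dict.getD_foldl_modify_append]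
  simp
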